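-- pv_equiv track=rewrite | github.com/Isti-k/sz-vegtetel | feladatok.py | feladat1
-- ===== SOURCE A (Python) =====
-- def feladat1(a:str):
--     i:int=0
--     semmi:int=0
--     while i<len(a):
--         if a[i]==" ":
--             semmi+=1
--         i+=1
--     return semmi
-- ===== SOURCE B (Python) =====
-- def feladat1(a: str):
--     return len(a) - len(a.replace(" ", ""))
-- ===== Notes on version B (the rewrite author's own statement) =====
-- stated objective: simpler
-- what changed: Replaced the index-walking while loop with a running counter by a build-and-measure one-liner: strip all spaces with str.replace and return the length difference.
import Mathlib
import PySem

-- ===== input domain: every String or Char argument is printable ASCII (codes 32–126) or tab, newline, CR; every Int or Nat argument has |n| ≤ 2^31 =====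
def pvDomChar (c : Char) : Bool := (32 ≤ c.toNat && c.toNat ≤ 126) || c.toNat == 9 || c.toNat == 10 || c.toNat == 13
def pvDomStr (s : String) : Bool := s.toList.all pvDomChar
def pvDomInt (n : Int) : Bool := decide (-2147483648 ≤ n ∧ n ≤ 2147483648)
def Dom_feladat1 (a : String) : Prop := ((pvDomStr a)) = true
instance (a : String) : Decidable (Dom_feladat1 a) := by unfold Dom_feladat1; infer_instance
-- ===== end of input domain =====

-- B replaces A's index-walk with a conditional counter by stripping spaces via replace
-- and taking the length difference (objective: simpler).

-- ===== PORT A =====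
-- while i < len(a): if a[i] == " ": semmi += 1; i += 1
-- (i is always in range here, so pyGetD is exact: pyGet? would be some)
def feladat1Go (a : List Char) (i : Nat) (semmi : Int) : Int :=
  if i < a.length then
    feladat1Go a (i + 1)
      (if PySem.List.pyGetD a (i : Int) ' ' == ' ' then semmi + 1 else semmi)
  else semmi
termination_by a.length - i

def feladat1 (a : String) : Int := feladat1Go a.toList 0 0

-- ===== PORT B =====
def feladat1_alt (a : String) : Int :=
  PySem.Str.len a - PySem.Str.len (PySem.Str.replace a " " "")

-- ===== PRECONDITION & SPEC =====
def Spec_feladat1 (a : String) (out : Int) : Prop := out = feladat1_alt a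
instance (a : String) (out : Int) : Decidable (Spec_feladat1 a out) := by unfold Spec_feladat1; infer_instance

-- ===== CLAIM (what is proved, stated in full; the proofs are below) =====
def Claim_equal_feladat1 : Prop := ∀ (a : String), Dom_feladat1 a → Spec_feladat1 a (feladat1 a)

-- ===== LEMMAS AND PROOFS =====

theorem replace_go_space (fuel : Nat) (l acc : List Char) (h : l.length ≤ fuel) :
    PySem.Chars.replace.go [' '] [] fuel l acc = acc.reverse ++ l.filter (· ≠ ' ') := by
  induction fuel generalizing l acc with
  | zero =>
    have : l = [] := List.eq_nil_of_length_eq_zero (Nat.le_zero.mp h)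
    subst this; simp [PySem.Chars.replace.go]
  | succ n ih =>
    cases l with
    | nil => simp [PySem.Chars.replace.go]
    | cons c t =>
      simp only [PySem.Chars.replace.go]
      by_cases hc : c = ' '
      · subst hc
        rw [if_pos (by simp [List.isPrefixOf])]
        simp only [List.length_cons] at h
        simp only [List.length_cons, List.length_nil, List.drop_succ_cons, List.drop_zero]
        rw [ih _ _ (by omega)]
        simp
      · rw [if_neg (by simp [List.isPrefixOf]; exact fun h' => hc h'.symm)]
        simp only [List.length_cons] at h
        rw [ih _ _ (by omega)]
        simp [hc]

theorem replace_space (l : List Char) :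
    PySem.Chars.replace l [' '] [] = l.filter (· ≠ ' ') := by
  rw [PySem.Chars.replace]
  simp only [List.isEmpty_cons, if_false, Bool.false_eq_true]
  exact replace_go_space l.length l [] le_rfl

theorem feladat1Go_eq (a : List Char) (i : Nat) (semmi : Int) :
    feladat1Go a i semmi = semmi + ((a.drop i).countP (· == ' ') : Int) := by
  induction hfuel : a.length - i generalizing i semmi with
  | zero =>
    rw [feladat1Go]
    rw [if_neg (by omega)]
    rw [List.drop_eq_nil_of_le (by omega)]
    simp
  | succ n ih =>
    rw [feladat1Go, if_pos (by omega)]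
    rw [ih (i + 1) _ (by omega)]
    have hi : i < a.length := by omega
    have hdrop : a.drop i = a[i] :: a.drop (i + 1) := List.drop_eq_getElem_cons hi
    rw [hdrop, List.countP_cons]
    have hget : PySem.List.pyGetD a (i : Int) ' ' = a[i] := by
      rw [PySem.List.pyGetD_natCast]
      simp [List.getD, hi]
    rw [hget]
    by_cases hc : a[i] = ' '
    · simp [hc]; ring
    · simp [hc]

theorem countP_eq_sub (l : List Char) :
    (l.countP (· == ' ') : Int) = (l.length : Int) - ((l.filter (· ≠ ' ')).length : Int) := by
  have h1 : l.countP (· == ' ') + (l.filter (· ≠ ' ')).length = l.length := by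
    rw [← List.countP_eq_length_filter]
    rw [List.length_eq_countP_add_countP (p := (· == ' ')) (l := l)]
    congr 1
    apply List.countP_congr
    intro c _
    simp
  omega

-- ===== VERDICT (by name: the statement is the Claim_ definition above) =====
theorem feladat1_spec : Claim_equal_feladat1 := by
  intro a _
  show feladat1 a = feladat1_alt a
  unfold feladat1 feladat1_alt
  rw [feladat1Go_eq]
  simp only [PySem.Str.len_eq, PySem.Str.toList_replace]
  have : ("" : String).toList = [] := rfl
  rw [show (" " : String).toList = [' '] from rfl, this, replace_space]
  rw [List.drop_zero, countP_eq_sub]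
  ring
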